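-- pv_equiv track=rewrite | github.com/htang7415/Max-Handbook | modules/software-engineering/testing/test-portfolio-in-practice/python/portfolio_in_practice.py | recommended_test_layers
-- ===== SOURCE A (Python) =====
-- def recommended_test_layers(change_tags: list[str]) -> list[str]:
--     normalized_tags = {tag.strip().lower() for tag in change_tags if tag.strip()}
--     layers = ["unit"]
--
--     if normalized_tags.intersection({"api", "schema", "serialization"}):
--         layers.append("contract")
--     if normalized_tags.intersection({"database", "workflow", "queue", "integration"}):
--         layers.append("integration")
--     if normalized_tags.intersection({"bugfix", "ai-generated", "security"}):
--         layers.append("regression")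
--     if normalized_tags.intersection({"critical-path", "ui-flow", "release"}):
--         layers.append("end-to-end")
--
--     return layers
-- ===== SOURCE B (Python) =====
-- _LAYER_BY_TAG = {
--     "api": "contract", "schema": "contract", "serialization": "contract",
--     "database": "integration", "workflow": "integration",
--     "queue": "integration", "integration": "integration",
--     "bugfix": "regression", "ai-generated": "regression", "security": "regression",
--     "critical-path": "end-to-end", "ui-flow": "end-to-end", "release": "end-to-end",
-- }
-- _LAYER_ORDER = ["contract", "integration", "regression", "end-to-end"]
--
--
-- def recommended_test_layers(change_tags: list[str]) -> list[str]:
--     triggered = set()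
--     for tag in change_tags:
--         stripped = tag.strip()
--         if not stripped:
--             continue
--         layer = _LAYER_BY_TAG.get(stripped.lower())
--         if layer:
--             triggered.add(layer)
--     return ["unit"] + [layer for layer in _LAYER_ORDER if layer in triggered]
-- ===== Notes on version B (the rewrite author's own statement) =====
-- stated objective: idiomatic
-- what changed: Replaces the four set-intersection tests against the whole tag set with a single pass over the input tags through a reverse tag-to-layer lookup table, then emits layers from a fixed canonical order filtered by the triggered set.
import Mathlib
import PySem

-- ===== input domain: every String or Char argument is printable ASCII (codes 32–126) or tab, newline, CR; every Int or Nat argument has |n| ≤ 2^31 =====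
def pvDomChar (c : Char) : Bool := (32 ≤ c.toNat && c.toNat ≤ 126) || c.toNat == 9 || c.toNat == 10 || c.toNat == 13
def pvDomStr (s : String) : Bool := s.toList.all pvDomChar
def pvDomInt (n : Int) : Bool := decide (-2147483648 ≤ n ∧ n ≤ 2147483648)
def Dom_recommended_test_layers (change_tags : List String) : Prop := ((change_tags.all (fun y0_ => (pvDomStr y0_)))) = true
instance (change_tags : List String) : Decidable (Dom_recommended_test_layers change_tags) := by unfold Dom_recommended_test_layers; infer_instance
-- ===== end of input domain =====

-- B replaces A's four set-intersection tests with one pass over the tags through a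
-- reverse tag→layer lookup table, emitting layers in a fixed canonical order (idiomatic).

-- ===== PORT A =====
def recommended_test_layers (change_tags : List String) : List String :=
  let normalized_tags : PySem.Set String :=
    change_tags.foldl (fun s tag =>
      if PySem.Str.strip tag ≠ "" then
        PySem.Set.add s (PySem.Str.lower (PySem.Str.strip tag))
      else s) PySem.Set.empty
  let layers := ["unit"]
  let layers := if PySem.Set.inter normalized_tags (PySem.Set.ofList ["api", "schema", "serialization"]) ≠ [] then layers ++ ["contract"] else layers
  let layers := if PySem.Set.inter normalized_tags (PySem.Set.ofList ["database", "workflow", "queue", "integration"]) ≠ [] then layers ++ ["integration"] else layers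
  let layers := if PySem.Set.inter normalized_tags (PySem.Set.ofList ["bugfix", "ai-generated", "security"]) ≠ [] then layers ++ ["regression"] else layers
  let layers := if PySem.Set.inter normalized_tags (PySem.Set.ofList ["critical-path", "ui-flow", "release"]) ≠ [] then layers ++ ["end-to-end"] else layers
  layers

-- ===== PORT B =====
def pvLayerByTag : PySem.Dict String String := PySem.Dict.ofList
  [("api", "contract"), ("schema", "contract"), ("serialization", "contract"),
   ("database", "integration"), ("workflow", "integration"),
   ("queue", "integration"), ("integration", "integration"),
   ("bugfix", "regression"), ("ai-generated", "regression"), ("security", "regression"),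
   ("critical-path", "end-to-end"), ("ui-flow", "end-to-end"), ("release", "end-to-end")]

def pvLayerOrder : List String := ["contract", "integration", "regression", "end-to-end"]

def recommended_test_layers_alt (change_tags : List String) : List String :=
  let triggered : PySem.Set String :=
    change_tags.foldl (fun tr tag =>
      if PySem.Str.strip tag = "" then tr
      else
        match PySem.Dict.get? pvLayerByTag (PySem.Str.lower (PySem.Str.strip tag)) with
        | some layer => PySem.Set.add tr layer
        | none => tr) PySem.Set.empty
  "unit" :: pvLayerOrder.filter (fun layer => PySem.Set.contains triggered layer)

-- ===== PRECONDITION & SPEC =====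
def Spec_recommended_test_layers (change_tags : List String) (out : List String) : Prop := out = recommended_test_layers_alt change_tags
instance (change_tags : List String) (out : List String) : Decidable (Spec_recommended_test_layers change_tags out) := by unfold Spec_recommended_test_layers; infer_instance

-- ===== CLAIM (what is proved, stated in full; the proofs are below) =====
def Claim_equal_recommended_test_layers : Prop := ∀ (change_tags : List String), Dom_recommended_test_layers change_tags → Spec_recommended_test_layers change_tags (recommended_test_layers change_tags)

-- ===== LEMMAS AND PROOFS =====

-- membership in A's normalized-tag set
theorem pv_memA (tags : List String) (init : PySem.Set String) (x : String) :
    x ∈ tags.foldl (fun s tag =>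
      if PySem.Str.strip tag ≠ "" then
        PySem.Set.add s (PySem.Str.lower (PySem.Str.strip tag))
      else s) init ↔
    x ∈ init ∨ ∃ tag ∈ tags, PySem.Str.strip tag ≠ "" ∧ PySem.Str.lower (PySem.Str.strip tag) = x := by
  induction tags generalizing init with
  | nil => simp
  | cons t ts ih =>
    simp only [List.foldl_cons]
    rw [ih]
    by_cases h : PySem.Str.strip t = ""
    · rw [if_neg (fun hc => hc h)]
      constructor
      · rintro (hx | ⟨tag, h1, h2, h3⟩)
        · exact Or.inl hx
        · exact Or.inr ⟨tag, List.mem_cons_of_mem _ h1, h2, h3⟩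
      · rintro (hx | ⟨tag, h1, h2, h3⟩)
        · exact Or.inl hx
        · rcases List.mem_cons.mp h1 with rfl | h1
          · exact absurd h h2
          · exact Or.inr ⟨tag, h1, h2, h3⟩
    · rw [if_pos h, PySem.Set.mem_add]
      constructor
      · rintro ((hx | rfl) | ⟨tag, h1, h2, h3⟩)
        · exact Or.inl hx
        · exact Or.inr ⟨t, List.mem_cons_self, h, rfl⟩
        · exact Or.inr ⟨tag, List.mem_cons_of_mem _ h1, h2, h3⟩
      · rintro (hx | ⟨tag, h1, h2, h3⟩)
        · exact Or.inl (Or.inl hx)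
        · rcases List.mem_cons.mp h1 with rfl | h1
          · exact Or.inl (Or.inr h3.symm)
          · exact Or.inr ⟨tag, h1, h2, h3⟩

-- membership in B's triggered set
theorem pv_memB (tags : List String) (init : PySem.Set String) (x : String) :
    x ∈ tags.foldl (fun tr tag =>
      if PySem.Str.strip tag = "" then tr
      else
        match PySem.Dict.get? pvLayerByTag (PySem.Str.lower (PySem.Str.strip tag)) with
        | some layer => PySem.Set.add tr layer
        | none => tr) init ↔
    x ∈ init ∨ ∃ tag ∈ tags, PySem.Str.strip tag ≠ "" ∧
      PySem.Dict.get? pvLayerByTag (PySem.Str.lower (PySem.Str.strip tag)) = some x := by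
  induction tags generalizing init with
  | nil => simp
  | cons t ts ih =>
    simp only [List.foldl_cons]
    rw [ih]
    by_cases h : PySem.Str.strip t = ""
    · rw [if_pos h]
      constructor
      · rintro (hx | ⟨tag, h1, h2, h3⟩)
        · exact Or.inl hx
        · exact Or.inr ⟨tag, List.mem_cons_of_mem _ h1, h2, h3⟩
      · rintro (hx | ⟨tag, h1, h2, h3⟩)
        · exact Or.inl hx
        · rcases List.mem_cons.mp h1 with rfl | h1
          · exact absurd h h2
          · exact Or.inr ⟨tag, h1, h2, h3⟩
    · rw [if_neg h]
      cases hg : PySem.Dict.get? pvLayerByTag (PySem.Str.lower (PySem.Str.strip t)) with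
      | none =>
        constructor
        · rintro (hx | ⟨tag, h1, h2, h3⟩)
          · exact Or.inl hx
          · exact Or.inr ⟨tag, List.mem_cons_of_mem _ h1, h2, h3⟩
        · rintro (hx | ⟨tag, h1, h2, h3⟩)
          · exact Or.inl hx
          · rcases List.mem_cons.mp h1 with rfl | h1
            · rw [hg] at h3; exact absurd h3 (by simp)
            · exact Or.inr ⟨tag, h1, h2, h3⟩
      | some layer =>
        simp only [PySem.Set.mem_add]
        constructor
        · rintro ((hx | rfl) | ⟨tag, h1, h2, h3⟩)
          · exact Or.inl hx
          · exact Or.inr ⟨t, List.mem_cons_self, h, hg⟩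
          · exact Or.inr ⟨tag, List.mem_cons_of_mem _ h1, h2, h3⟩
        · rintro (hx | ⟨tag, h1, h2, h3⟩)
          · exact Or.inl (Or.inl hx)
          · rcases List.mem_cons.mp h1 with rfl | h1
            · rw [hg] at h3; exact Or.inl (Or.inr (Option.some_inj.mp h3).symm)
            · exact Or.inr ⟨tag, h1, h2, h3⟩

-- the literal reverse map, in constructor form for lookup reasoning
set_option maxHeartbeats 1000000 in
theorem pv_dict_eq : pvLayerByTag = PySem.Dict.mk
    [("api", "contract"), ("schema", "contract"), ("serialization", "contract"),
     ("database", "integration"), ("workflow", "integration"),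
     ("queue", "integration"), ("integration", "integration"),
     ("bugfix", "regression"), ("ai-generated", "regression"), ("security", "regression"),
     ("critical-path", "end-to-end"), ("ui-flow", "end-to-end"), ("release", "end-to-end")] := by rfl

-- reverse lookup characterisations, one per layer
set_option maxHeartbeats 1000000 in
theorem pv_getC (t : String) :
    PySem.Dict.get? pvLayerByTag t = some "contract" ↔ ("api" = t ∨ "schema" = t ∨ "serialization" = t) := by
  rw [pv_dict_eq]
  rw [PySem.Dict.get?_mk_cons, PySem.Dict.get?_mk_cons, PySem.Dict.get?_mk_cons, PySem.Dict.get?_mk_cons, PySem.Dict.get?_mk_cons, PySem.Dict.get?_mk_cons, PySem.Dict.get?_mk_cons, PySem.Dict.get?_mk_cons, PySem.Dict.get?_mk_cons, PySem.Dict.get?_mk_cons, PySem.Dict.get?_mk_cons, PySem.Dict.get?_mk_cons, PySem.Dict.get?_mk_cons]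
  by_cases h1 : (("api" : String) == t) = true
  · rw [if_pos h1]
    have e := beq_iff_eq.mp h1; subst e; decide
  · rw [if_neg h1]
    by_cases h2 : (("schema" : String) == t) = true
    · rw [if_pos h2]
      have e := beq_iff_eq.mp h2; subst e; decide
    · rw [if_neg h2]
      by_cases h3 : (("serialization" : String) == t) = true
      · rw [if_pos h3]
        have e := beq_iff_eq.mp h3; subst e; decide
      · rw [if_neg h3]
        by_cases h4 : (("database" : String) == t) = true
        · rw [if_pos h4]
          have e := beq_iff_eq.mp h4; subst e; decide
        · rw [if_neg h4]
          by_cases h5 : (("workflow" : String) == t) = true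
          · rw [if_pos h5]
            have e := beq_iff_eq.mp h5; subst e; decide
          · rw [if_neg h5]
            by_cases h6 : (("queue" : String) == t) = true
            · rw [if_pos h6]
              have e := beq_iff_eq.mp h6; subst e; decide
            · rw [if_neg h6]
              by_cases h7 : (("integration" : String) == t) = true
              · rw [if_pos h7]
                have e := beq_iff_eq.mp h7; subst e; decide
              · rw [if_neg h7]
                by_cases h8 : (("bugfix" : String) == t) = true
                · rw [if_pos h8]
                  have e := beq_iff_eq.mp h8; subst e; decide
                · rw [if_neg h8]
                  by_cases h9 : (("ai-generated" : String) == t) = true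
                  · rw [if_pos h9]
                    have e := beq_iff_eq.mp h9; subst e; decide
                  · rw [if_neg h9]
                    by_cases h10 : (("security" : String) == t) = true
                    · rw [if_pos h10]
                      have e := beq_iff_eq.mp h10; subst e; decide
                    · rw [if_neg h10]
                      by_cases h11 : (("critical-path" : String) == t) = true
                      · rw [if_pos h11]
                        have e := beq_iff_eq.mp h11; subst e; decide
                      · rw [if_neg h11]
                        by_cases h12 : (("ui-flow" : String) == t) = true
                        · rw [if_pos h12]
                          have e := beq_iff_eq.mp h12; subst e; decide
                        · rw [if_neg h12]
                          by_cases h13 : (("release" : String) == t) = true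
                          · rw [if_pos h13]
                            have e := beq_iff_eq.mp h13; subst e; decide
                          · rw [if_neg h13]
                            have hn : PySem.Dict.get? (PySem.Dict.mk ([] : List (String × String))) t = none := rfl
                            rw [hn]
                            constructor
                            · intro h; simp at h
                            · rintro (h | h | h)
                              · exact absurd (beq_iff_eq.mpr h) h1
                              · exact absurd (beq_iff_eq.mpr h) h2
                              · exact absurd (beq_iff_eq.mpr h) h3

set_option maxHeartbeats 1000000 in
theorem pv_getI (t : String) :
    PySem.Dict.get? pvLayerByTag t = some "integration" ↔ ("database" = t ∨ "workflow" = t ∨ "queue" = t ∨ "integration" = t) := by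
  rw [pv_dict_eq]
  rw [PySem.Dict.get?_mk_cons, PySem.Dict.get?_mk_cons, PySem.Dict.get?_mk_cons, PySem.Dict.get?_mk_cons, PySem.Dict.get?_mk_cons, PySem.Dict.get?_mk_cons, PySem.Dict.get?_mk_cons, PySem.Dict.get?_mk_cons, PySem.Dict.get?_mk_cons, PySem.Dict.get?_mk_cons, PySem.Dict.get?_mk_cons, PySem.Dict.get?_mk_cons, PySem.Dict.get?_mk_cons]
  by_cases h1 : (("api" : String) == t) = true
  · rw [if_pos h1]
    have e := beq_iff_eq.mp h1; subst e; decide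
  · rw [if_neg h1]
    by_cases h2 : (("schema" : String) == t) = true
    · rw [if_pos h2]
      have e := beq_iff_eq.mp h2; subst e; decide
    · rw [if_neg h2]
      by_cases h3 : (("serialization" : String) == t) = true
      · rw [if_pos h3]
        have e := beq_iff_eq.mp h3; subst e; decide
      · rw [if_neg h3]
        by_cases h4 : (("database" : String) == t) = true
        · rw [if_pos h4]
          have e := beq_iff_eq.mp h4; subst e; decide
        · rw [if_neg h4]
          by_cases h5 : (("workflow" : String) == t) = true
          · rw [if_pos h5]
            have e := beq_iff_eq.mp h5; subst e; decide
          · rw [if_neg h5]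
            by_cases h6 : (("queue" : String) == t) = true
            · rw [if_pos h6]
              have e := beq_iff_eq.mp h6; subst e; decide
            · rw [if_neg h6]
              by_cases h7 : (("integration" : String) == t) = true
              · rw [if_pos h7]
                have e := beq_iff_eq.mp h7; subst e; decide
              · rw [if_neg h7]
                by_cases h8 : (("bugfix" : String) == t) = true
                · rw [if_pos h8]
                  have e := beq_iff_eq.mp h8; subst e; decide
                · rw [if_neg h8]
                  by_cases h9 : (("ai-generated" : String) == t) = true
                  · rw [if_pos h9]
                    have e := beq_iff_eq.mp h9; subst e; decide
                  · rw [if_neg h9]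
                    by_cases h10 : (("security" : String) == t) = true
                    · rw [if_pos h10]
                      have e := beq_iff_eq.mp h10; subst e; decide
                    · rw [if_neg h10]
                      by_cases h11 : (("critical-path" : String) == t) = true
                      · rw [if_pos h11]
                        have e := beq_iff_eq.mp h11; subst e; decide
                      · rw [if_neg h11]
                        by_cases h12 : (("ui-flow" : String) == t) = true
                        · rw [if_pos h12]
                          have e := beq_iff_eq.mp h12; subst e; decide
                        · rw [if_neg h12]
                          by_cases h13 : (("release" : String) == t) = true
                          · rw [if_pos h13]
                            have e := beq_iff_eq.mp h13; subst e; decide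
                          · rw [if_neg h13]
                            have hn : PySem.Dict.get? (PySem.Dict.mk ([] : List (String × String))) t = none := rfl
                            rw [hn]
                            constructor
                            · intro h; simp at h
                            · rintro (h | h | h | h)
                              · exact absurd (beq_iff_eq.mpr h) h4
                              · exact absurd (beq_iff_eq.mpr h) h5
                              · exact absurd (beq_iff_eq.mpr h) h6
                              · exact absurd (beq_iff_eq.mpr h) h7

set_option maxHeartbeats 1000000 in
theorem pv_getR (t : String) :
    PySem.Dict.get? pvLayerByTag t = some "regression" ↔ ("bugfix" = t ∨ "ai-generated" = t ∨ "security" = t) := by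
  rw [pv_dict_eq]
  rw [PySem.Dict.get?_mk_cons, PySem.Dict.get?_mk_cons, PySem.Dict.get?_mk_cons, PySem.Dict.get?_mk_cons, PySem.Dict.get?_mk_cons, PySem.Dict.get?_mk_cons, PySem.Dict.get?_mk_cons, PySem.Dict.get?_mk_cons, PySem.Dict.get?_mk_cons, PySem.Dict.get?_mk_cons, PySem.Dict.get?_mk_cons, PySem.Dict.get?_mk_cons, PySem.Dict.get?_mk_cons]
  by_cases h1 : (("api" : String) == t) = true
  · rw [if_pos h1]
    have e := beq_iff_eq.mp h1; subst e; decide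
  · rw [if_neg h1]
    by_cases h2 : (("schema" : String) == t) = true
    · rw [if_pos h2]
      have e := beq_iff_eq.mp h2; subst e; decide
    · rw [if_neg h2]
      by_cases h3 : (("serialization" : String) == t) = true
      · rw [if_pos h3]
        have e := beq_iff_eq.mp h3; subst e; decide
      · rw [if_neg h3]
        by_cases h4 : (("database" : String) == t) = true
        · rw [if_pos h4]
          have e := beq_iff_eq.mp h4; subst e; decide
        · rw [if_neg h4]
          by_cases h5 : (("workflow" : String) == t) = true
          · rw [if_pos h5]
            have e := beq_iff_eq.mp h5; subst e; decide
          · rw [if_neg h5]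
            by_cases h6 : (("queue" : String) == t) = true
            · rw [if_pos h6]
              have e := beq_iff_eq.mp h6; subst e; decide
            · rw [if_neg h6]
              by_cases h7 : (("integration" : String) == t) = true
              · rw [if_pos h7]
                have e := beq_iff_eq.mp h7; subst e; decide
              · rw [if_neg h7]
                by_cases h8 : (("bugfix" : String) == t) = true
                · rw [if_pos h8]
                  have e := beq_iff_eq.mp h8; subst e; decide
                · rw [if_neg h8]
                  by_cases h9 : (("ai-generated" : String) == t) = true
                  · rw [if_pos h9]
                    have e := beq_iff_eq.mp h9; subst e; decide
                  · rw [if_neg h9]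
                    by_cases h10 : (("security" : String) == t) = true
                    · rw [if_pos h10]
                      have e := beq_iff_eq.mp h10; subst e; decide
                    · rw [if_neg h10]
                      by_cases h11 : (("critical-path" : String) == t) = true
                      · rw [if_pos h11]
                        have e := beq_iff_eq.mp h11; subst e; decide
                      · rw [if_neg h11]
                        by_cases h12 : (("ui-flow" : String) == t) = true
                        · rw [if_pos h12]
                          have e := beq_iff_eq.mp h12; subst e; decide
                        · rw [if_neg h12]
                          by_cases h13 : (("release" : String) == t) = true
                          · rw [if_pos h13]
                            have e := beq_iff_eq.mp h13; subst e; decide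
                          · rw [if_neg h13]
                            have hn : PySem.Dict.get? (PySem.Dict.mk ([] : List (String × String))) t = none := rfl
                            rw [hn]
                            constructor
                            · intro h; simp at h
                            · rintro (h | h | h)
                              · exact absurd (beq_iff_eq.mpr h) h8
                              · exact absurd (beq_iff_eq.mpr h) h9
                              · exact absurd (beq_iff_eq.mpr h) h10

set_option maxHeartbeats 1000000 in
theorem pv_getE (t : String) :
    PySem.Dict.get? pvLayerByTag t = some "end-to-end" ↔ ("critical-path" = t ∨ "ui-flow" = t ∨ "release" = t) := by
  rw [pv_dict_eq]
  rw [PySem.Dict.get?_mk_cons, PySem.Dict.get?_mk_cons, PySem.Dict.get?_mk_cons, PySem.Dict.get?_mk_cons, PySem.Dict.get?_mk_cons, PySem.Dict.get?_mk_cons, PySem.Dict.get?_mk_cons, PySem.Dict.get?_mk_cons, PySem.Dict.get?_mk_cons, PySem.Dict.get?_mk_cons, PySem.Dict.get?_mk_cons, PySem.Dict.get?_mk_cons, PySem.Dict.get?_mk_cons]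
  by_cases h1 : (("api" : String) == t) = true
  · rw [if_pos h1]
    have e := beq_iff_eq.mp h1; subst e; decide
  · rw [if_neg h1]
    by_cases h2 : (("schema" : String) == t) = true
    · rw [if_pos h2]
      have e := beq_iff_eq.mp h2; subst e; decide
    · rw [if_neg h2]
      by_cases h3 : (("serialization" : String) == t) = true
      · rw [if_pos h3]
        have e := beq_iff_eq.mp h3; subst e; decide
      · rw [if_neg h3]
        by_cases h4 : (("database" : String) == t) = true
        · rw [if_pos h4]
          have e := beq_iff_eq.mp h4; subst e; decide
        · rw [if_neg h4]
          by_cases h5 : (("workflow" : String) == t) = true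
          · rw [if_pos h5]
            have e := beq_iff_eq.mp h5; subst e; decide
          · rw [if_neg h5]
            by_cases h6 : (("queue" : String) == t) = true
            · rw [if_pos h6]
              have e := beq_iff_eq.mp h6; subst e; decide
            · rw [if_neg h6]
              by_cases h7 : (("integration" : String) == t) = true
              · rw [if_pos h7]
                have e := beq_iff_eq.mp h7; subst e; decide
              · rw [if_neg h7]
                by_cases h8 : (("bugfix" : String) == t) = true
                · rw [if_pos h8]
                  have e := beq_iff_eq.mp h8; subst e; decide
                · rw [if_neg h8]
                  by_cases h9 : (("ai-generated" : String) == t) = true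
                  · rw [if_pos h9]
                    have e := beq_iff_eq.mp h9; subst e; decide
                  · rw [if_neg h9]
                    by_cases h10 : (("security" : String) == t) = true
                    · rw [if_pos h10]
                      have e := beq_iff_eq.mp h10; subst e; decide
                    · rw [if_neg h10]
                      by_cases h11 : (("critical-path" : String) == t) = true
                      · rw [if_pos h11]
                        have e := beq_iff_eq.mp h11; subst e; decide
                      · rw [if_neg h11]
                        by_cases h12 : (("ui-flow" : String) == t) = true
                        · rw [if_pos h12]
                          have e := beq_iff_eq.mp h12; subst e; decide
                        · rw [if_neg h12]
                          by_cases h13 : (("release" : String) == t) = true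
                          · rw [if_pos h13]
                            have e := beq_iff_eq.mp h13; subst e; decide
                          · rw [if_neg h13]
                            have hn : PySem.Dict.get? (PySem.Dict.mk ([] : List (String × String))) t = none := rfl
                            rw [hn]
                            constructor
                            · intro h; simp at h
                            · rintro (h | h | h)
                              · exact absurd (beq_iff_eq.mpr h) h11
                              · exact absurd (beq_iff_eq.mpr h) h12
                              · exact absurd (beq_iff_eq.mpr h) h13

-- the two trigger conditions coincide, layer by layer
theorem pv_cond (tags : List String) (K : List String) (l : String)
    (hl : ∀ t, PySem.Dict.get? pvLayerByTag t = some l ↔ t ∈ K) :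
    (PySem.Set.inter
      (tags.foldl (fun s tag =>
        if PySem.Str.strip tag ≠ "" then
          PySem.Set.add s (PySem.Str.lower (PySem.Str.strip tag))
        else s) PySem.Set.empty) (PySem.Set.ofList K) ≠ []) ↔
    l ∈ tags.foldl (fun tr tag =>
      if PySem.Str.strip tag = "" then tr
      else
        match PySem.Dict.get? pvLayerByTag (PySem.Str.lower (PySem.Str.strip tag)) with
        | some layer => PySem.Set.add tr layer
        | none => tr) PySem.Set.empty := by
  rw [Ne, List.eq_nil_iff_forall_not_mem, pv_memB]
  constructor
  · intro hne
    rcases not_forall.mp hne with ⟨x, hx⟩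
    rw [not_not] at hx
    rw [PySem.Set.mem_inter, pv_memA] at hx
    obtain ⟨hS, hK⟩ := hx
    rcases hS with h | ⟨tag, htag, hne', hlow⟩
    · exact absurd h (by simp [PySem.Set.empty])
    · exact Or.inr ⟨tag, htag, hne', by rw [hl, hlow]; simpa [PySem.Set.mem_ofList] using hK⟩
  · rintro (h | ⟨tag, htag, hne', hget⟩) hall
    · exact absurd h (by simp [PySem.Set.empty])
    · refine hall (PySem.Str.lower (PySem.Str.strip tag)) ?_
      rw [PySem.Set.mem_inter, pv_memA]
      exact ⟨Or.inr ⟨tag, htag, hne', rfl⟩, by simp only [PySem.Set.mem_ofList]; exact (hl _).mp hget⟩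

-- ===== VERDICT (by name: the statement is the Claim_ definition above) =====
set_option maxHeartbeats 1000000 in
theorem recommended_test_layers_spec : Claim_equal_recommended_test_layers := by
  intro tags _
  unfold Spec_recommended_test_layers
  have hC := pv_cond tags ["api", "schema", "serialization"] "contract" (by intro t; rw [pv_getC]; simp [eq_comm])
  have hI := pv_cond tags ["database", "workflow", "queue", "integration"] "integration" (by intro t; rw [pv_getI]; simp [eq_comm])
  have hR := pv_cond tags ["bugfix", "ai-generated", "security"] "regression" (by intro t; rw [pv_getR]; simp [eq_comm])
  have hE := pv_cond tags ["critical-path", "ui-flow", "release"] "end-to-end" (by intro t; rw [pv_getE]; simp [eq_comm])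
  simp only [recommended_test_layers, recommended_test_layers_alt, pvLayerOrder,
    List.filter_cons, List.filter_nil, PySem.Set.contains_eq_listContains, List.contains_eq_mem,
    decide_eq_true_eq, hC, hI, hR, hE]
  split_ifs <;> rfl
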